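-- pv_equiv track=rewrite | github.com/Matthew-J-Lew/natural-language-to-UML-pipeline | scripts/validate_spec.py | split_bool
-- ===== SOURCE A (Python) =====
-- def split_bool(expr: str, bool_ops: list[str]) -> list[str]:
--     """
--     Split an expression into tokens by boolean operators (&&, ||),
--     preserving the operators as tokens and trimming whitespace on atoms.
--     Example: 'a && b || c' -> ['a', '&&', 'b', '||', 'c']
--     """
--     tokens: list[str] = []
--     buf = ""
--     i = 0
--
--     while i < len(expr):
--         if expr.startswith("&&", i) or expr.startswith("||", i):
--             tokens.append(buf.strip())
--             tokens.append(expr[i:i + 2])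
--             buf = ""
--             i += 2
--         else:
--             buf += expr[i]
--             i += 1
--
--     if buf.strip():
--         tokens.append(buf.strip())
--
--     return tokens
-- ===== SOURCE B (Python) =====
-- def split_bool(expr: str, bool_ops: list[str]) -> list[str]:
--     """Slice-based variant: repeatedly find the earliest '&&'/'||' and cut."""
--     tokens: list[str] = []
--     rest = expr
--     while True:
--         i1 = rest.find("&&")
--         i2 = rest.find("||")
--         if i1 == -1 and i2 == -1:
--             break
--         if i1 == -1:
--             i = i2
--         elif i2 == -1:
--             i = i1
--         else:
--             i = min(i1, i2)
--         tokens.append(rest[:i].strip())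
--         tokens.append(rest[i:i + 2])
--         rest = rest[i + 2:]
--     last = rest.strip()
--     if last:
--         tokens.append(last)
--     return tokens
-- ===== Notes on version B (the rewrite author's own statement) =====
-- stated objective: faster
-- what changed: Replaces A's character-by-character scan with a growing buffer by a slicing loop that repeatedly str.find()s the earliest '&&'/'||' occurrence, emits the stripped prefix and the operator, and continues on the remainder; same O(n) work but the inner scan moves into C-level str.find/slicing.
import Mathlib
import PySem

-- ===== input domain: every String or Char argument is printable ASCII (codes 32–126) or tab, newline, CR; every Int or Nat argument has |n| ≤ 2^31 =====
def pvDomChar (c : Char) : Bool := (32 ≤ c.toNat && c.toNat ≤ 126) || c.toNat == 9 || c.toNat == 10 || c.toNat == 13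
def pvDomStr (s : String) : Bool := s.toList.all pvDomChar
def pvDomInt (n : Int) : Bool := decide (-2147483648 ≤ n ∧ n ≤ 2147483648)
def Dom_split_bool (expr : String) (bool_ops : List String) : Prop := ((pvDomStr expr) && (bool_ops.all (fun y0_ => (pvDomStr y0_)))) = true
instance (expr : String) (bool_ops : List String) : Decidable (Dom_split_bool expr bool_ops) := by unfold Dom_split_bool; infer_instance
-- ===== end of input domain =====

-- B replaces A's char-by-char buffer scan with a find-the-next-operator slicing loop (objective: faster, constant-factor; measured).

-- ===== PORT A =====
-- A's while loop: position i becomes the remaining character list, buf the accumulator.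
def splitBoolLoopA (l : List Char) (tokens : List String) (buf : List Char) : List String :=
  match l with
  | [] =>
      if PySem.Chars.strip buf = [] then tokens
      else tokens ++ [String.ofList (PySem.Chars.strip buf)]
  | c :: rest =>
      if PySem.Chars.startswith (c :: rest) ['&', '&'] || PySem.Chars.startswith (c :: rest) ['|', '|'] then
        splitBoolLoopA ((c :: rest).drop 2)
          (tokens ++ [String.ofList (PySem.Chars.strip buf), String.ofList ((c :: rest).take 2)]) []
      else
        splitBoolLoopA rest tokens (buf ++ [c])
termination_by l.length
decreasing_by
  · simp
  · simp

def split_bool (expr : String) (bool_ops : List String) : List String :=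
  splitBoolLoopA expr.toList [] []

-- ===== PORT B =====
-- B's while True loop: rest is sliced at the earliest operator occurrence found by str.find.
def splitBoolLoopB (rest : List Char) (tokens : List String) : List String :=
  let i1 := PySem.Chars.find rest ['&', '&']
  let i2 := PySem.Chars.find rest ['|', '|']
  if h : i1 = -1 ∧ i2 = -1 then
    -- break, then the code after the loop
    let last := PySem.Chars.strip rest
    if last = [] then tokens else tokens ++ [String.ofList last]
  else
    let i := if i1 = -1 then i2 else if i2 = -1 then i1 else min i1 i2
    splitBoolLoopB (PySem.Chars.slice rest (some (i + 2)) none)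
      (tokens ++ [String.ofList (PySem.Chars.strip (PySem.Chars.slice rest none (some i))),
                  String.ofList (PySem.Chars.slice rest (some i) (some (i + 2)))])
termination_by rest.length
decreasing_by
  have key : ∀ a : Int, 0 ≤ a → 2 ≤ rest.length →
      (PySem.List.slice rest (some (a + 2)) none).length < rest.length := by
    intro a ha hlen
    rw [PySem.List.slice_from rest (by omega : (0:Int) ≤ a + 2)]
    simp only [List.length_drop]
    omega
  have hlen : 2 ≤ rest.length := by
    rcases not_and_or.mp h with h1 | h2
    · have := (PySem.Chars.find_ne_neg_one_iff rest ['&','&']).mp h1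
      simpa using this.length_le
    · have := (PySem.Chars.find_ne_neg_one_iff rest ['|','|']).mp h2
      simpa using this.length_le
  refine key _ ?_ hlen
  have n1 := PySem.Chars.neg_one_le_find rest ['&','&']
  have n2 := PySem.Chars.neg_one_le_find rest ['|','|']
  rcases not_and_or.mp h with h1 | h2 <;> split_ifs <;> simp_all <;> omega
def split_bool_alt (expr : String) (bool_ops : List String) : List String :=
  splitBoolLoopB expr.toList []

-- ===== PRECONDITION & SPEC =====
def Spec_split_bool (expr : String) (bool_ops : List String) (out : List String) : Prop := out = split_bool_alt expr bool_ops
instance (expr : String) (bool_ops : List String) (out : List String) : Decidable (Spec_split_bool expr bool_ops out) := by unfold Spec_split_bool; infer_instance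

-- ===== CLAIM (what is proved, stated in full; the proofs are below) =====
def Claim_equal_split_bool : Prop := ∀ (expr : String) (bool_ops : List String), Dom_split_bool expr bool_ops → Spec_split_bool expr bool_ops (split_bool expr bool_ops)

-- ===== LEMMAS AND PROOFS =====

-- No '&&'/'||' occurrence starts in the first k positions of s.
def pvNoOp (s : List Char) (k : Nat) : Prop :=
  ∀ j, j < k → ¬ ['&','&'] <+: s.drop j ∧ ¬ ['|','|'] <+: s.drop j

theorem pv_find_eq_of_first (s : List Char) (op : List Char) (k : Nat)
    (hk : op <+: s.drop k) (hmin : ∀ j, j < k → ¬ op <+: s.drop j) :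
    PySem.Chars.find s op = (k : Int) := by
  have hinf : op <:+: s := hk.isInfix.trans (List.drop_suffix k s).isInfix
  have hne := (PySem.Chars.find_ne_neg_one_iff s op).mpr hinf
  have hlow := PySem.Chars.neg_one_le_find s op
  have h0 : 0 ≤ PySem.Chars.find s op := by omega
  obtain ⟨hpre, hmin'⟩ := PySem.Chars.find_spec h0
  by_cases hlt : (PySem.Chars.find s op).toNat < k
  · exact absurd hpre (hmin _ hlt)
  by_cases hgt : k < (PySem.Chars.find s op).toNat
  · exact absurd hk (hmin' k hgt)
  omega

theorem pv_find_eq_neg_one (s : List Char) (op : List Char) (hne : op ≠ [])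
    (h : ∀ j, j < s.length → ¬ op <+: s.drop j) :
    PySem.Chars.find s op = -1 := by
  rw [PySem.Chars.find_eq_neg_one_iff]
  intro hinf
  have hIn := (PySem.Chars.isIn_iff_infix op s).mpr hinf
  obtain ⟨j, hj⟩ := (PySem.Chars.exists_prefix_drop_iff_isIn op s).mpr hIn
  by_cases hjl : j < s.length
  · exact h j hjl hj
  · rw [List.drop_eq_nil_of_le (by omega)] at hj
    exact hne (List.prefix_nil.mp hj)

-- A's find-at-position-m facts packaged for the cons-with-operator case.
theorem pv_find_ge (s : List Char) (op : List Char) (m : Nat)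
    (hmin : ∀ j, j < m → ¬ op <+: s.drop j) (hne : PySem.Chars.find s op ≠ -1) :
    (m : Int) ≤ PySem.Chars.find s op := by
  have hlow := PySem.Chars.neg_one_le_find s op
  have h0 : 0 ≤ PySem.Chars.find s op := by omega
  obtain ⟨hpre, _⟩ := PySem.Chars.find_spec h0
  by_cases hlt : (PySem.Chars.find s op).toNat < m
  · exact absurd hpre (hmin _ hlt)
  · omega

theorem pv_nil (tokens : List String) (buf : List Char) (hno : pvNoOp buf buf.length) :
    splitBoolLoopA [] tokens buf = splitBoolLoopB buf tokens := by
  have f1 : PySem.Chars.find buf ['&','&'] = -1 :=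
    pv_find_eq_neg_one buf _ (by simp) (fun j hj => (hno j hj).1)
  have f2 : PySem.Chars.find buf ['|','|'] = -1 :=
    pv_find_eq_neg_one buf _ (by simp) (fun j hj => (hno j hj).2)
  rw [splitBoolLoopA, splitBoolLoopB]
  by_cases hs : PySem.Chars.strip buf = [] <;> simp [f1, f2, hs]

-- One step of B's loop when the earliest operator occurrence starts at position m.
theorem pv_loopB_step (s : List Char) (tokens : List String) (m : Nat)
    (h : (PySem.Chars.find s ['&','&'] = (m : Int) ∧
            (PySem.Chars.find s ['|','|'] = -1 ∨ (m : Int) ≤ PySem.Chars.find s ['|','|'])) ∨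
         (PySem.Chars.find s ['|','|'] = (m : Int) ∧
            (PySem.Chars.find s ['&','&'] = -1 ∨ (m : Int) ≤ PySem.Chars.find s ['&','&']))) :
    splitBoolLoopB s tokens =
      splitBoolLoopB (PySem.Chars.slice s (some ((m : Int) + 2)) none)
        (tokens ++ [String.ofList (PySem.Chars.strip (PySem.Chars.slice s none (some (m : Int)))),
                    String.ofList (PySem.Chars.slice s (some (m : Int)) (some ((m : Int) + 2)))]) := by
  conv_lhs => rw [splitBoolLoopB]
  have hm : ((m : Int) = -1) = False := by simp
  rcases h with ⟨h1, h2⟩ | ⟨h2, h1⟩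
  · rcases h2 with h2 | h2
    · simp [h1, h2, hm]
    · have : ¬ PySem.Chars.find s ['|','|'] = -1 := by omega
      simp [h1, hm, this, min_eq_left h2]
  · rcases h1 with h1 | h1
    · simp [h1, h2, hm]
    · have : ¬ PySem.Chars.find s ['&','&'] = -1 := by omega
      simp [h1, h2, hm]

theorem pv_main : ∀ (n : Nat) (l : List Char), l.length ≤ n → ∀ tokens buf,
    pvNoOp (buf ++ l) buf.length →
    splitBoolLoopA l tokens buf = splitBoolLoopB (buf ++ l) tokens := by
  intro n
  induction n with
  | zero =>
    intro l hl tokens buf hno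
    have : l = [] := List.eq_nil_of_length_eq_zero (by omega)
    subst this
    simpa using pv_nil tokens buf (by simpa using hno)
  | succ n IH =>
    intro l hl tokens buf hno
    match l with
    | [] => simpa using pv_nil tokens buf (by simpa using hno)
    | c :: rest =>
      by_cases hop : (PySem.Chars.startswith (c :: rest) ['&','&'] || PySem.Chars.startswith (c :: rest) ['|','|']) = true
      · rw [splitBoolLoopA, if_pos hop]
        have hdrop : (buf ++ c :: rest).drop buf.length = c :: rest := by simp
        have hno1 : ∀ j, j < buf.length → ¬ ['&','&'] <+: (buf ++ c :: rest).drop j :=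
          fun j hj => (hno j hj).1
        have hno2 : ∀ j, j < buf.length → ¬ ['|','|'] <+: (buf ++ c :: rest).drop j :=
          fun j hj => (hno j hj).2
        have hstep : splitBoolLoopB (buf ++ c :: rest) tokens =
            splitBoolLoopB (PySem.Chars.slice (buf ++ c :: rest) (some ((buf.length : Int) + 2)) none)
              (tokens ++ [String.ofList (PySem.Chars.strip (PySem.Chars.slice (buf ++ c :: rest) none (some (buf.length : Int)))),
                          String.ofList (PySem.Chars.slice (buf ++ c :: rest) (some (buf.length : Int)) (some ((buf.length : Int) + 2)))]) := by
          apply pv_loopB_step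
          rcases Bool.or_eq_true_iff.mp hop with hA | hA
          · left
            refine ⟨pv_find_eq_of_first _ _ _ (by rw [hdrop]; exact (PySem.Chars.startswith_iff _ _).mp hA) hno1, ?_⟩
            by_cases hf : PySem.Chars.find (buf ++ c :: rest) ['|','|'] = -1
            · exact Or.inl hf
            · exact Or.inr (pv_find_ge _ _ _ hno2 hf)
          · right
            refine ⟨pv_find_eq_of_first _ _ _ (by rw [hdrop]; exact (PySem.Chars.startswith_iff _ _).mp hA) hno2, ?_⟩
            by_cases hf : PySem.Chars.find (buf ++ c :: rest) ['&','&'] = -1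
            · exact Or.inl hf
            · exact Or.inr (pv_find_ge _ _ _ hno1 hf)
        rw [hstep]
        have hc : (buf.length : Int) + 2 = ((buf.length + 2 : Nat) : Int) := by push_cast; ring
        have e1 : PySem.Chars.slice (buf ++ c :: rest) none (some (buf.length : Int)) = buf := by
          simp [PySem.Chars.slice_eq_listSlice, PySem.List.slice_to_natCast]
        have e2 : PySem.Chars.slice (buf ++ c :: rest) (some (buf.length : Int)) (some ((buf.length : Int) + 2)) = (c :: rest).take 2 := by
          rw [PySem.Chars.slice_eq_listSlice, hc, PySem.List.slice_natCast]
          simp [hdrop]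
        have e3 : PySem.Chars.slice (buf ++ c :: rest) (some ((buf.length : Int) + 2)) none = (c :: rest).drop 2 := by
          rw [PySem.Chars.slice_eq_listSlice, hc, PySem.List.slice_from_natCast]
          have h4 : List.drop (buf.length + 2) buf = [] := List.drop_eq_nil_of_le (by omega)
          simp [List.drop_append, h4]
        rw [e1, e2, e3]
        have := IH ((c :: rest).drop 2)
          (by simp only [List.length_cons] at hl; simp; omega)
          (tokens ++ [String.ofList (PySem.Chars.strip buf), String.ofList ((c :: rest).take 2)]) []
          (by intro j hj; simp at hj)
        simpa using this
      · -- no operator starts here: c joins the buffer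
        rw [splitBoolLoopA, if_neg (by simp [hop])]
        have hno' : pvNoOp ((buf ++ [c]) ++ rest) (buf ++ [c]).length := by
          intro j hj
          simp only [List.append_assoc, List.singleton_append, List.length_append,
            List.length_singleton] at hj ⊢
          by_cases hjm : j < buf.length
          · simpa using hno j hjm
          · have hje : j = buf.length := by omega
            subst hje
            rw [List.drop_left]
            rcases Bool.or_eq_false_iff.mp (Bool.eq_false_iff.mpr hop) with ⟨h1, h2⟩
            constructor
            · intro hp; exact absurd ((PySem.Chars.startswith_iff _ _).mpr hp) (by simp [h1])
            · intro hp; exact absurd ((PySem.Chars.startswith_iff _ _).mpr hp) (by simp [h2])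
        have := IH rest (by simpa using hl) tokens (buf ++ [c]) hno'
        simpa [List.append_assoc] using this

-- ===== VERDICT (by name: the statement is the Claim_ definition above) =====
theorem split_bool_spec : Claim_equal_split_bool := by
  intro expr bool_ops _
  unfold Spec_split_bool split_bool split_bool_alt
  simpa using pv_main expr.toList.length expr.toList le_rfl [] []
    (by intro j hj; simp at hj)
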